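-- pv_equiv track=rewrite | github.com/iwabuchiken/WS_Others_prog_D-7_2_2_VIRTUAL.20180918_143948 | Admin_Projects/mm/libs_mm/libfx.py | get_LO_PairOf_Time_StartEnd__V1
-- ===== SOURCE A (Python) =====
-- def get_LO_PairOf_Time_StartEnd__V1(str_Date, hour_Start, hour_End) :
--
--     lo_Datetime = []
--
--     lo_Minutes = ["00", "30"]
--
-- #     hour_Start = 1
-- #     hour_End = 6
--
--     for i in range(hour_Start, hour_End + 1):
-- #     for i in range(1,7):
--
--         tmp_1 = str_Date + " " + "0" + str(i) + ":" + lo_Minutes[0]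
--         tmp_2 = str_Date + " " + "0" + str(i) + ":" + lo_Minutes[1]
--         tmp_3 = str_Date + " " + "0" + str(i + 1) + ":" + lo_Minutes[0]
--
--         lo_Datetime.append((tmp_1, tmp_2))
--         lo_Datetime.append((tmp_2, tmp_3))
--
--     #/for i in range(1,7):
--
--     # return
--     return lo_Datetime
-- ===== SOURCE B (Python) =====
-- def get_LO_PairOf_Time_StartEnd__V1(str_Date, hour_Start, hour_End):
--     # Chain of half-hour boundary strings; each result pair is two adjacent boundaries.
--     bounds = []
--     for i in range(hour_Start, hour_End + 1):
--         bounds.append(str_Date + " 0" + str(i) + ":00")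
--         bounds.append(str_Date + " 0" + str(i) + ":30")
--     if bounds:
--         bounds.append(str_Date + " 0" + str(hour_End + 1) + ":00")
--     nxt = iter(bounds)
--     next(nxt, None)  # zip each boundary with the following one
--     return list(zip(bounds, nxt))
-- ===== Notes on version B (the rewrite author's own statement) =====
-- stated objective: simpler
-- what changed: Instead of emitting two pairs per hour inside the loop, B builds one flat list of half-hour boundary strings (plus a closing boundary when non-empty) and returns zip(bounds, bounds[1:]), pairing each boundary with the next.
import Mathlib
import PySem

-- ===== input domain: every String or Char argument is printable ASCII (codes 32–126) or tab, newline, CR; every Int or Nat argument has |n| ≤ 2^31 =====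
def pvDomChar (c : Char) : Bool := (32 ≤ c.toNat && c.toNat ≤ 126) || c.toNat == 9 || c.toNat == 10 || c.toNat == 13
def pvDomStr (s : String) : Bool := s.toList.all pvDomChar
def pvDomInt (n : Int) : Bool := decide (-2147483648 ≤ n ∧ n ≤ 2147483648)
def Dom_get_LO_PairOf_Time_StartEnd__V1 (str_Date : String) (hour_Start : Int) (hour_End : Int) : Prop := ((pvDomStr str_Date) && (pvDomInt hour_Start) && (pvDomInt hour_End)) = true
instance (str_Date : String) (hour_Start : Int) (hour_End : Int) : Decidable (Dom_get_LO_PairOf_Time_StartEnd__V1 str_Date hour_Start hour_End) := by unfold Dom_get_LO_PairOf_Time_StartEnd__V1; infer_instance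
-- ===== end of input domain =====

-- B replaces A's per-hour emission of two pairs by one flat list of half-hour
-- boundary strings zipped with its own tail (objective: simpler decomposition).

-- ===== PORT A =====
-- literal transliteration of A: loop over range(hour_Start, hour_End+1),
-- appending two pairs built from lo_Minutes[0]/lo_Minutes[1] (indices always in range)
def get_LO_PairOf_Time_StartEnd__V1 (str_Date : String) (hour_Start : Int) (hour_End : Int) : List (String × String) :=
  let lo_Minutes : List String := ["00", "30"]
  (PySem.List.pyRange hour_Start (hour_End + 1) 1).foldl (fun lo_Datetime i =>
    let tmp_1 := str_Date ++ " " ++ "0" ++ PySem.Int.toStr i ++ ":" ++ PySem.List.pyGetD lo_Minutes 0 ""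
    let tmp_2 := str_Date ++ " " ++ "0" ++ PySem.Int.toStr i ++ ":" ++ PySem.List.pyGetD lo_Minutes 1 ""
    let tmp_3 := str_Date ++ " " ++ "0" ++ PySem.Int.toStr (i + 1) ++ ":" ++ PySem.List.pyGetD lo_Minutes 0 ""
    lo_Datetime ++ [(tmp_1, tmp_2)] ++ [(tmp_2, tmp_3)]) []

-- ===== PORT B =====
-- transliteration of Source B: build the flat boundary list, close it if non-empty,
-- then pair each boundary with the next (zip with the tail)
def get_LO_PairOf_Time_StartEnd__V1_alt (str_Date : String) (hour_Start : Int) (hour_End : Int) : List (String × String) :=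
  let bounds := (PySem.List.pyRange hour_Start (hour_End + 1) 1).foldl (fun acc i =>
    acc ++ [str_Date ++ " 0" ++ PySem.Int.toStr i ++ ":00"]
        ++ [str_Date ++ " 0" ++ PySem.Int.toStr i ++ ":30"]) []
  let bounds2 := if bounds.isEmpty then bounds
                 else bounds ++ [str_Date ++ " 0" ++ PySem.Int.toStr (hour_End + 1) ++ ":00"]
  bounds2.zip bounds2.tail

-- ===== PRECONDITION & SPEC =====
def Spec_get_LO_PairOf_Time_StartEnd__V1 (str_Date : String) (hour_Start : Int) (hour_End : Int) (out : List (String × String)) : Prop := out = get_LO_PairOf_Time_StartEnd__V1_alt str_Date hour_Start hour_End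
instance (str_Date : String) (hour_Start : Int) (hour_End : Int) (out : List (String × String)) : Decidable (Spec_get_LO_PairOf_Time_StartEnd__V1 str_Date hour_Start hour_End out) := by unfold Spec_get_LO_PairOf_Time_StartEnd__V1; infer_instance

-- ===== CLAIM (what is proved, stated in full; the proofs are below) =====
def Claim_equal_get_LO_PairOf_Time_StartEnd__V1 : Prop := ∀ (str_Date : String) (hour_Start : Int) (hour_End : Int), Dom_get_LO_PairOf_Time_StartEnd__V1 str_Date hour_Start hour_End → Spec_get_LO_PairOf_Time_StartEnd__V1 str_Date hour_Start hour_End (get_LO_PairOf_Time_StartEnd__V1 str_Date hour_Start hour_End)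

-- ===== LEMMAS AND PROOFS =====

-- the two boundary strings, in B's grouping
def pvS00 (d : String) (i : Int) : String := d ++ " 0" ++ PySem.Int.toStr i ++ ":00"
def pvS30 (d : String) (i : Int) : String := d ++ " 0" ++ PySem.Int.toStr i ++ ":30"

theorem pvS00_def (d : String) (i : Int) :
    d ++ " 0" ++ PySem.Int.toStr i ++ ":00" = pvS00 d i := rfl
theorem pvS30_def (d : String) (i : Int) :
    d ++ " 0" ++ PySem.Int.toStr i ++ ":30" = pvS30 d i := rfl

theorem pvA00 (d : String) (i : Int) :
    d ++ " " ++ "0" ++ PySem.Int.toStr i ++ ":" ++ PySem.List.pyGetD ["00","30"] 0 "" = pvS00 d i := by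
  show d ++ " " ++ "0" ++ PySem.Int.toStr i ++ ":" ++ "00" = pvS00 d i
  unfold pvS00
  simp only [String.append_assoc]
  rfl

theorem pvA30 (d : String) (i : Int) :
    d ++ " " ++ "0" ++ PySem.Int.toStr i ++ ":" ++ PySem.List.pyGetD ["00","30"] 1 "" = pvS30 d i := by
  show d ++ " " ++ "0" ++ PySem.Int.toStr i ++ ":" ++ "30" = pvS30 d i
  unfold pvS30
  simp only [String.append_assoc]
  rfl

-- the boundary chain of length 2n+1 starting at hour a
def pvChain (d : String) : Nat → Int → List String
  | 0, a => [pvS00 d a]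
  | n+1, a => pvS00 d a :: pvS30 d a :: pvChain d n (a+1)

-- A's pair list for hours a, a+1, …, a+n-1
def pvPairs (d : String) : Nat → Int → List (String × String)
  | 0, _ => []
  | n+1, a => (pvS00 d a, pvS30 d a) :: (pvS30 d a, pvS00 d (a+1)) :: pvPairs d n (a+1)

theorem pvFlatA (d : String) : ∀ (n : Nat) (a : Int),
    (PySem.List.pyRange a (a + n) 1).flatMap
      (fun i => [(pvS00 d i, pvS30 d i), (pvS30 d i, pvS00 d (i+1))]) = pvPairs d n a := by
  intro n
  induction n with
  | zero => intro a; rw [PySem.List.pyRange_one_eq_nil (by simp)]; rfl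
  | succ n ih =>
    intro a
    rw [PySem.List.pyRange_one_cons (by omega)]
    have h : a + ((n : Int) + 1) = (a + 1) + n := by omega
    simp only [List.flatMap_cons, Nat.cast_add, Nat.cast_one, ← add_assoc]
    rw [show a + (n : Int) + 1 = (a + 1) + n by omega] at *
    rw [ih (a + 1)]
    rfl

theorem pvFlatB (d : String) : ∀ (n : Nat) (a : Int),
    (PySem.List.pyRange a (a + n) 1).flatMap (fun i => [pvS00 d i, pvS30 d i])
      ++ [pvS00 d (a + n)] = pvChain d n a := by
  intro n
  induction n with
  | zero => intro a; rw [PySem.List.pyRange_one_eq_nil (by simp)]; simp [pvChain]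
  | succ n ih =>
    intro a
    rw [PySem.List.pyRange_one_cons (by omega)]
    simp only [List.flatMap_cons, Nat.cast_add, Nat.cast_one]
    rw [show a + ((n : Int) + 1) = (a + 1) + n by omega]
    simp only [List.cons_append, List.append_assoc]
    rw [ih (a + 1)]
    rfl

-- zipping a cons onto a chain: the chain always starts with pvS00 d a
theorem pvZipCons (d : String) (y : String) : ∀ (n : Nat) (a : Int),
    (y :: pvChain d n a).zip (pvChain d n a)
      = (y, pvS00 d a) :: (pvChain d n a).zip (pvChain d n a).tail := by
  intro n a
  cases n <;> simp [pvChain]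

theorem pvZipChain (d : String) : ∀ (n : Nat) (a : Int),
    (pvChain d n a).zip (pvChain d n a).tail = pvPairs d n a := by
  intro n
  induction n with
  | zero => intro a; simp [pvChain, pvPairs]
  | succ n ih =>
    intro a
    show (pvS00 d a :: pvS30 d a :: pvChain d n (a+1)).zip
          (pvS30 d a :: pvChain d n (a+1)) = pvPairs d (n+1) a
    rw [List.zip_cons_cons, pvZipCons d (pvS30 d a) n (a+1), ih (a+1)]
    rfl

-- ===== VERDICT (by name: the statement is the Claim_ definition above) =====
theorem get_LO_PairOf_Time_StartEnd__V1_spec : Claim_equal_get_LO_PairOf_Time_StartEnd__V1 := by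
  intro d hs he _
  unfold Spec_get_LO_PairOf_Time_StartEnd__V1
  unfold get_LO_PairOf_Time_StartEnd__V1 get_LO_PairOf_Time_StartEnd__V1_alt
  simp only [List.append_assoc, List.singleton_append, PySem.List.foldl_append_eq_flatMap,
    List.nil_append, pvA00, pvA30, pvS00_def, pvS30_def]
  by_cases h : he + 1 ≤ hs
  · rw [PySem.List.pyRange_one_eq_nil h]
    simp
  · rw [not_le] at h
    set n : Nat := (he + 1 - hs).toNat with hn
    have hne : he + 1 = hs + n := by omega
    have hpos : 0 < n := by omega
    rw [hne, pvFlatA d n hs]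
    have hcons : PySem.List.pyRange hs (hs + n) 1 = hs :: PySem.List.pyRange (hs+1) (hs + n) 1 :=
      PySem.List.pyRange_one_cons (by omega)
    have hnonempty :
        ((PySem.List.pyRange hs (hs + n) 1).flatMap (fun i => [pvS00 d i, pvS30 d i])).isEmpty = false := by
      rw [hcons]; simp
    rw [hnonempty]
    simp only [Bool.false_eq_true, if_false]
    rw [pvFlatB d n hs, pvZipChain d n hs]
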